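-- pv_equiv track=rewrite | github.com/guilhermereiiss/Testes-de-Performance-PYTHON | tps/tp3/questao12.py | extrair_codigos
-- ===== SOURCE A (Python) =====
-- def extrair_codigos(mensagem):
--
--     resultados = []
--     i = 0
--     while i < len(mensagem):
--         if mensagem[i] == "@":
--             # Encontrar o próximo #
--             fim = i + 1
--             while fim < len(mensagem) and mensagem[fim] != "#":
--                 fim += 1
--             if fim < len(mensagem):
--                 # Extrair conteúdo entre @ e #
--                 trecho = mensagem[i+1:fim]
--                 # Remover caracteres inválidos
--                 codigo_limpo = ""
--                 for char in trecho:
--                     if char.isalnum():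
--                         codigo_limpo += char
--                 if codigo_limpo:
--                     resultados.append(codigo_limpo)
--                 i = fim  # pular para depois do #
--         i += 1
--     return resultados
-- ===== SOURCE B (Python) =====
-- def extrair_codigos(mensagem):
--     resultados = []
--     inside = False
--     buf = []
--     for ch in mensagem:
--         if inside:
--             if ch == "#":
--                 if buf:
--                     resultados.append("".join(buf))
--                 buf = []
--                 inside = False
--             elif ch.isalnum():
--                 buf.append(ch)
--         elif ch == "@":
--             inside = True
--             buf = []
--     return resultados
-- ===== Notes on version B (the rewrite author's own statement) =====
-- stated objective: faster
-- what changed: Replaced the index-based scan with nested look-ahead and per-region slicing/filtering by a single left-to-right state-machine pass (inside-region flag plus an alnum buffer flushed at each closing delimiter), removing the quadratic re-scan on unterminated regions.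
import Mathlib
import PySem

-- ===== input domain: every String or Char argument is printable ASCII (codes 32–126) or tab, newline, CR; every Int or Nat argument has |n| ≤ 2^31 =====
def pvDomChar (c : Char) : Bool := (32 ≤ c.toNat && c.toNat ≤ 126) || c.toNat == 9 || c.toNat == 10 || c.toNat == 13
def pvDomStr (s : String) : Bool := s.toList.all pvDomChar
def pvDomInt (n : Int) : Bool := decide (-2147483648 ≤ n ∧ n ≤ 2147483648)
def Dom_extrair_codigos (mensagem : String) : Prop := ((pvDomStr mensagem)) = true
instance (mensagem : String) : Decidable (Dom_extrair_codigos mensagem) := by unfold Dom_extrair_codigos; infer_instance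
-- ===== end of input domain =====

-- B replaces A's nested look-ahead scan by one linear state-machine pass (asymptotically faster; measured).

-- ===== PORT A =====
-- inner while of A: first index ≥ j holding '#' (fuel only guards totality; fuel ≥ cs.length - j suffices)
def pvFindHash (cs : List Char) (j : Nat) (fuel : Nat) : Nat :=
  match fuel with
  | 0 => j
  | fuel + 1 =>
    if h : j < cs.length then
      if cs[j] = '#' then j else pvFindHash cs (j + 1) fuel
    else j

-- outer while loop of A, state (resultados, i); fuel only guards totality (i strictly increases)
def pvALoop (cs : List Char) (res : List String) (i : Nat) (fuel : Nat) : List String :=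
  match fuel with
  | 0 => res
  | fuel + 1 =>
    if h : i < cs.length then
      if cs[i] = '@' then
        let fim := pvFindHash cs (i + 1) (cs.length - i)
        if fim < cs.length then
          -- trecho = mensagem[i+1:fim]; codigo_limpo keeps the alnum chars; append if nonempty; i jumps to fim+1
          let codigo := ((cs.drop (i + 1)).take (fim - (i + 1))).filter PySem.Chars.isalnum
          let res' := if codigo ≠ [] then res ++ [String.ofList codigo] else res
          pvALoop cs res' (fim + 1) fuel
        else pvALoop cs res (i + 1) fuel
      else pvALoop cs res (i + 1) fuel
    else res

def extrair_codigos (mensagem : String) : List String :=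
  pvALoop mensagem.toList [] 0 (mensagem.toList.length + 1)

-- ===== PORT B =====
-- state machine step: state = (resultados, inside, buf)
def pvBStep (s : List String × Bool × List Char) (c : Char) : List String × Bool × List Char :=
  match s with
  | (res, inside, buf) =>
    if inside then
      if c = '#' then (if buf ≠ [] then res ++ [String.ofList buf] else res, false, [])
      else if PySem.Chars.isalnum c then (res, true, buf ++ [c])
      else (res, true, buf)
    else if c = '@' then (res, true, [])
    else (res, false, buf)

def extrair_codigos_alt (mensagem : String) : List String :=
  (mensagem.toList.foldl pvBStep ([], false, [])).1

-- ===== PRECONDITION & SPEC =====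
def Spec_extrair_codigos (mensagem : String) (out : List String) : Prop := out = extrair_codigos_alt mensagem
instance (mensagem : String) (out : List String) : Decidable (Spec_extrair_codigos mensagem out) := by unfold Spec_extrair_codigos; infer_instance

-- ===== CLAIM (what is proved, stated in full; the proofs are below) =====
def Claim_equal_extrair_codigos : Prop := ∀ (mensagem : String), Dom_extrair_codigos mensagem → Spec_extrair_codigos mensagem (extrair_codigos mensagem)

-- ===== LEMMAS AND PROOFS =====

-- fuel-free description of A's inner while, used only by the proofs
def pvHash (cs : List Char) (j : Nat) : Nat :=
  if h : j < cs.length then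
    if cs[j] = '#' then j else pvHash cs (j + 1)
  else j
termination_by cs.length - j

def pvFlush (res : List String) (l : List Char) : List String :=
  if l ≠ [] then res ++ [String.ofList l] else res

def pvSeg (cs : List Char) (j : Nat) : List Char :=
  ((cs.drop j).take (pvHash cs j - j)).filter PySem.Chars.isalnum

theorem pvHash_ge (cs : List Char) (j : Nat) : j ≤ pvHash cs j := by
  unfold pvHash
  split
  · split
    · exact Nat.le_refl _
    · have := pvHash_ge cs (j + 1); omega
  · exact Nat.le_refl _
termination_by cs.length - j

theorem pvHash_hash (cs : List Char) (j : Nat) (h : j < cs.length) (hc : cs[j] = '#') :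
    pvHash cs j = j := by
  conv_lhs => rw [pvHash]
  rw [dif_pos h, if_pos hc]

theorem pvHash_step (cs : List Char) (j : Nat) (h : j < cs.length) (hc : cs[j] ≠ '#') :
    pvHash cs j = pvHash cs (j + 1) := by
  conv_lhs => rw [pvHash]
  rw [dif_pos h, if_neg hc]

-- enough fuel: pvFindHash computes pvHash
theorem pvFindHash_eq (cs : List Char) (fuel j : Nat) (hf : cs.length - j < fuel) :
    pvFindHash cs j fuel = pvHash cs j := by
  induction fuel generalizing j with
  | zero => omega
  | succ fuel ih =>
    rw [pvFindHash]
    by_cases h : j < cs.length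
    · rw [dif_pos h]
      by_cases hc : cs[j] = '#'
      · rw [if_pos hc, pvHash_hash cs j h hc]
      · rw [if_neg hc, pvHash_step cs j h hc]
        exact ih (j + 1) (by omega)
    · rw [dif_neg h]
      unfold pvHash
      rw [dif_neg h]

-- inner scan ↔ state-machine run while 'inside' is set
theorem pvInner (cs : List Char) (j : Nat) (res : List String) (buf : List Char)
    (hj : j ≤ cs.length) :
    ((cs.drop j).foldl pvBStep (res, true, buf)).1 =
      if pvHash cs j < cs.length then
        ((cs.drop (pvHash cs j + 1)).foldl pvBStep (pvFlush res (buf ++ pvSeg cs j), false, [])).1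
      else res := by
  by_cases h : j < cs.length
  · rw [List.drop_eq_getElem_cons h]
    by_cases hc : cs[j] = '#'
    · have hf := pvHash_hash cs j h hc
      rw [List.foldl_cons]
      have hseg : pvSeg cs j = [] := by
        simp [pvSeg, hf]
      rw [hseg, if_pos (show pvHash cs j < cs.length by rw [hf]; exact h), hf]
      simp only [hc, List.append_nil]
      simp [pvBStep, pvFlush]
    · have hf := pvHash_step cs j h hc
      have hge : j + 1 ≤ pvHash cs (j + 1) := pvHash_ge cs (j + 1)
      have hseg : buf ++ pvSeg cs j =
          (if PySem.Chars.isalnum cs[j] then buf ++ [cs[j]] else buf) ++ pvSeg cs (j + 1) := by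
        have htake : (cs.drop j).take (pvHash cs j - j)
            = cs[j] :: ((cs.drop (j + 1)).take (pvHash cs (j + 1) - (j + 1))) := by
          rw [List.drop_eq_getElem_cons h, hf]
          have : pvHash cs (j + 1) - j = (pvHash cs (j + 1) - (j + 1)) + 1 := by omega
          rw [this, List.take_succ_cons]
        simp only [pvSeg, htake, List.filter_cons]
        by_cases ha : PySem.Chars.isalnum cs[j] <;> simp [ha]
      rw [List.foldl_cons]
      by_cases ha : PySem.Chars.isalnum cs[j]
      · have hstep : pvBStep (res, true, buf) cs[j] = (res, true, buf ++ [cs[j]]) := by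
          simp [pvBStep, hc, ha]
        rw [hstep, pvInner cs (j + 1) res (buf ++ [cs[j]]) (by omega), ← hf]
        rw [hseg]; simp [ha]
      · have hstep : pvBStep (res, true, buf) cs[j] = (res, true, buf) := by
          simp [pvBStep, hc, ha]
        rw [hstep, pvInner cs (j + 1) res buf (by omega), ← hf]
        rw [hseg]; simp [ha]
  · have hj' : j = cs.length := by omega
    have hf : pvHash cs j = j := by unfold pvHash; rw [dif_neg h]
    rw [if_neg (by omega), List.drop_eq_nil_of_le (by omega), List.foldl_nil]
termination_by cs.length - j

-- after an '@' with no later '#', A appends nothing more (any fuel)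
theorem pvNoHash (cs : List Char) (fuel i : Nat) (res : List String)
    (hn : ¬ pvHash cs i < cs.length) :
    pvALoop cs res i fuel = res := by
  induction fuel generalizing i with
  | zero => rfl
  | succ fuel ih =>
    rw [pvALoop]
    split
    · rename_i h
      have hc : cs[i] ≠ '#' := fun hc => hn (by rw [pvHash_hash cs i h hc]; exact h)
      have hn' : ¬ pvHash cs (i + 1) < cs.length := by
        rw [pvHash_step cs i h hc] at hn; exact hn
      have hfe : pvFindHash cs (i + 1) (cs.length - i) = pvHash cs (i + 1) :=
        pvFindHash_eq cs (cs.length - i) (i + 1) (by omega)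
      split
      · rw [hfe, if_neg hn']
        exact ih (i + 1) hn'
      · exact ih (i + 1) hn'
    · rfl

theorem pvMain (cs : List Char) (fuel i : Nat) (res : List String)
    (hi : i ≤ cs.length) (hf : cs.length - i < fuel) :
    pvALoop cs res i fuel = ((cs.drop i).foldl pvBStep (res, false, [])).1 := by
  induction fuel generalizing i res with
  | zero => omega
  | succ fuel ih =>
    rw [pvALoop]
    split
    · rename_i h
      rw [List.drop_eq_getElem_cons h, List.foldl_cons]
      by_cases hq : cs[i] = '@'
      · rw [if_pos hq]
        have hstep : pvBStep (res, false, []) cs[i] = (res, true, []) := by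
          simp [pvBStep, hq]
        have hfe : pvFindHash cs (i + 1) (cs.length - i) = pvHash cs (i + 1) :=
          pvFindHash_eq cs (cs.length - i) (i + 1) (by omega)
        rw [hstep, hfe, pvInner cs (i + 1) res [] (by omega)]
        by_cases hlt : pvHash cs (i + 1) < cs.length
        · rw [if_pos hlt, if_pos hlt]
          have hge : i + 1 ≤ pvHash cs (i + 1) := pvHash_ge cs (i + 1)
          rw [ih (pvHash cs (i + 1) + 1) _ (by omega) (by omega)]
          simp only [pvFlush, pvSeg, List.nil_append]
        · rw [if_neg hlt, if_neg hlt]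
          exact pvNoHash cs fuel (i + 1) res hlt
      · rw [if_neg hq]
        have hstep : pvBStep (res, false, []) cs[i] = (res, false, []) := by
          simp [pvBStep, hq]
        rw [hstep]
        exact ih (i + 1) res (by omega) (by omega)
    · rename_i h
      rw [List.drop_eq_nil_of_le (by omega), List.foldl_nil]

-- ===== VERDICT (by name: the statement is the Claim_ definition above) =====
theorem extrair_codigos_spec : Claim_equal_extrair_codigos := by
  intro m _
  unfold Spec_extrair_codigos extrair_codigos extrair_codigos_alt
  have := pvMain m.toList (m.toList.length + 1) 0 [] (by omega) (by omega)
  simpa using this
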